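-- pv_equiv track=rewrite | github.com/Louise-X10/delta-debugging | example.py | apply_remove
-- ===== SOURCE A (Python) =====
-- def apply_remove(deltas, removed):
--     delta_dict = {idx: char for idx, char in deltas}
--     for start_idx, chars in removed:
--         for i in range(len(chars)):  # Remove each character from the given start index
--             if start_idx + i in delta_dict:
--                 del delta_dict[start_idx + i]
--     deltas = sorted(delta_dict.items())
--     return deltas
-- ===== SOURCE B (Python) =====
-- def apply_remove(deltas, removed):
--     # survivors swept off sorted events against sorted removal intervals (one merge pass,
--     # no per-character deletion loop)
--     events = sorted({idx: char for idx, char in deltas}.items())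
--     ivals = sorted((s, s + len(cs)) for s, cs in removed)
--     out = []
--     j = 0
--     maxend = None
--     for idx, char in events:
--         while j < len(ivals) and ivals[j][0] <= idx:
--             e = ivals[j][1]
--             if maxend is None or e > maxend:
--                 maxend = e
--             j += 1
--         if maxend is None or idx >= maxend:
--             out.append((idx, char))
--     return out
-- ===== Notes on version B (the rewrite author's own statement) =====
-- stated objective: faster
-- what changed: Replaces A's per-character deletion loop over a dict with a sort-and-sweep merge: sort the deduplicated deltas and the removal intervals (start, start+len), then one two-pointer pass with a running max interval end decides which entries survive; cost no longer depends on the total number of removed character positions.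
import Mathlib
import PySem

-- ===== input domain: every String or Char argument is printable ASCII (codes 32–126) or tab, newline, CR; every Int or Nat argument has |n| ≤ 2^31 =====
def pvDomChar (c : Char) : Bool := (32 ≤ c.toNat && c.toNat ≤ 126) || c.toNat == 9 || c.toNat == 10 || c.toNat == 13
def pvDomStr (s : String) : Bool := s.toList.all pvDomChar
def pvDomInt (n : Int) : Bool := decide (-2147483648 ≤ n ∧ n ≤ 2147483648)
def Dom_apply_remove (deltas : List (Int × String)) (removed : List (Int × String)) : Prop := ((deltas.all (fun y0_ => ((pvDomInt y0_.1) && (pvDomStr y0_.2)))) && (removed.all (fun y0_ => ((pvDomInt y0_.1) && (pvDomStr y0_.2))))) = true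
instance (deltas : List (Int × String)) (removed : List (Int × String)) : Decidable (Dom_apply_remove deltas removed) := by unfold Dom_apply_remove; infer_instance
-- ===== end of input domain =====

-- B replaces A's per-character deletion loop over a dict with a sort-and-sweep merge over
-- sorted removal intervals (alternative algorithm; cost independent of total removed length).

-- ===== PORT A =====
def apply_remove (deltas : List (Int × String)) (removed : List (Int × String)) : List (Int × String) :=
  let delta_dict : PySem.Dict Int String := PySem.Dict.ofList deltas
  let delta_dict := removed.foldl (fun d q =>
    (PySem.List.pyRange 0 (PySem.Str.len q.2) 1).foldl (fun d i =>
      if d.contains (q.1 + i) then d.erase (q.1 + i) else d) d) delta_dict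
  PySem.List.sorted2 delta_dict.items (fun p => p.1) (fun p => p.2)

-- ===== PORT B =====
-- `maxend = max(maxend, e)` step of Source B ('if maxend is None or e > maxend: maxend = e')
def pvUpd (m : Option Int) (e : Int) : Option Int :=
  match m with
  | none => some e
  | some v => if e > v then some e else some v

-- Source B's inner 'while j < len(ivals) and ivals[j][0] <= idx' loop
def pvWhileB (ivals : List (Int × Int)) (idx : Int) (j : Nat) (maxend : Option Int) : Nat × Option Int :=
  if h : j < ivals.length then
    if (ivals[j]).1 ≤ idx then pvWhileB ivals idx (j + 1) (pvUpd maxend (ivals[j]).2)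
    else (j, maxend)
  else (j, maxend)
termination_by ivals.length - j

-- one iteration of Source B's 'for idx, char in events' loop (state: j, maxend, out)
def pvStep (ivals : List (Int × Int)) (st : Nat × Option Int × List (Int × String))
    (p : Int × String) : Nat × Option Int × List (Int × String) :=
  let jm := pvWhileB ivals p.1 st.1 st.2.1
  if (match jm.2 with | none => true | some v => decide (v ≤ p.1))
  then (jm.1, jm.2, st.2.2 ++ [p])
  else (jm.1, jm.2, st.2.2)

def apply_remove_alt (deltas : List (Int × String)) (removed : List (Int × String)) : List (Int × String) :=
  let events := PySem.List.sorted2 (PySem.Dict.ofList deltas).items (fun p => p.1) (fun p => p.2)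
  let ivals := PySem.List.sorted2 (removed.map (fun q => (q.1, q.1 + PySem.Str.len q.2))) (fun p => p.1) (fun p => p.2)
  let st := events.foldl (pvStep ivals) ((0 : Nat), (none : Option Int), ([] : List (Int × String)))
  st.2.2

-- ===== PRECONDITION & SPEC =====
def Spec_apply_remove (deltas : List (Int × String)) (removed : List (Int × String)) (out : List (Int × String)) : Prop := out = apply_remove_alt deltas removed
instance (deltas : List (Int × String)) (removed : List (Int × String)) (out : List (Int × String)) : Decidable (Spec_apply_remove deltas removed out) := by unfold Spec_apply_remove; infer_instance

-- ===== CLAIM (what is proved, stated in full; the proofs are below) =====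
def Claim_equal_apply_remove : Prop := ∀ (deltas : List (Int × String)) (removed : List (Int × String)), Dom_apply_remove deltas removed → Spec_apply_remove deltas removed (apply_remove deltas removed)

-- ===== LEMMAS AND PROOFS =====

-- the removal condition on a key
def pvHit (removed : List (Int × String)) (k : Int) : Bool :=
  removed.any (fun q => decide (q.1 ≤ k ∧ k < q.1 + PySem.Str.len q.2))

-- sorted2 with fst/snd keys is sort by the lexicographic order
theorem pv_sorted2_eq_lex {β : Type} [LinearOrder β] (xs : List (Int × β)) :
    PySem.List.sorted2 xs (fun p => p.1) (fun p => p.2)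
      = PySem.List.sorted xs (fun p => toLex (p.1, p.2)) := by
  show List.foldl (fun acc x => PySem.List.insertBy _ x acc) [] xs
      = List.foldl (fun acc x => PySem.List.insertBy _ x acc) [] xs
  have hfun : (fun (a b : Int × β) =>
        decide (a.1 < b.1) || (!decide (b.1 < a.1) && decide (a.2 < b.2)))
      = (fun (a b : Int × β) => decide (toLex (a.1, a.2) < toLex (b.1, b.2))) := by
    funext a b
    have h : (toLex (a.1, a.2) < toLex (b.1, b.2)) ↔ (a.1 < b.1 ∨ a.1 = b.1 ∧ a.2 < b.2) :=
      Prod.Lex.toLex_lt_toLex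
    rw [Bool.eq_iff_iff]
    simp only [Bool.or_eq_true, Bool.and_eq_true, Bool.not_eq_true', decide_eq_true_eq,
      decide_eq_false_iff_not, h]
    rcases lt_trichotomy a.1 b.1 with h1 | h1 | h1
    · have hnb : ¬ b.1 < a.1 := lt_asymm h1
      tauto
    · have hna : ¬ a.1 < b.1 := by rw [h1]; exact lt_irrefl _
      have hnb : ¬ b.1 < a.1 := by rw [h1]; exact lt_irrefl _
      tauto
    · have hna : ¬ a.1 < b.1 := lt_asymm h1
      have hne : ¬ a.1 = b.1 := fun he => absurd h1 (by rw [he]; exact lt_irrefl _)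
      tauto
  rw [hfun]

-- A's guarded delete is a filter on the items
theorem pv_items_step (d : PySem.Dict Int String) (k : Int) :
    (if d.contains k then d.erase k else d).items = d.items.filter (fun p => !(p.1 == k)) := by
  by_cases hc : d.contains k = true
  · rw [if_pos hc]
    rcases d with ⟨l⟩
    simp [PySem.Dict.erase]
  · rw [if_neg hc]
    have : ∀ p ∈ d.items, (!(p.1 == k)) = true := by
      intro p hp
      rw [PySem.Dict.contains_eq_isSome_get?] at hc
      rcases d with ⟨l⟩
      simp only [PySem.Dict.get?] at hc
      by_contra hne
      simp only [Bool.not_eq_true', Bool.not_eq_false, beq_iff_eq] at hne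
      have : (List.find? (fun p => p.1 == k) l).isSome = true := by
        rw [List.find?_isSome]
        exact ⟨p, hp, by simp [hne]⟩
      simp_all
    exact (List.filter_eq_self.mpr this).symm

-- A's inner per-character loop is a filter on the items
theorem pv_items_inner (js : List Int) (s : Int) (d : PySem.Dict Int String) :
    (js.foldl (fun d i => if d.contains (s + i) then d.erase (s + i) else d) d).items
      = d.items.filter (fun p => !js.any (fun i => p.1 == s + i)) := by
  induction js generalizing d with
  | nil => simp
  | cons i t ih =>
    simp only [List.foldl_cons, ih, pv_items_step, List.filter_filter]
    apply List.filter_congr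
    intro p _
    simp only [List.any_cons]
    cases h1 : (p.1 == s + i) <;> cases h2 : t.any (fun i => p.1 == s + i) <;> simp [h1, h2]

-- the whole deletion loop is a filter by pvHit
theorem pv_items_A (removed : List (Int × String)) (d : PySem.Dict Int String) :
    (removed.foldl (fun d q =>
      (PySem.List.pyRange 0 (PySem.Str.len q.2) 1).foldl (fun d i =>
        if d.contains (q.1 + i) then d.erase (q.1 + i) else d) d) d).items
      = d.items.filter (fun p => !pvHit removed p.1) := by
  induction removed generalizing d with
  | nil =>
    simp [pvHit]
  | cons q t ih =>
    simp only [List.foldl_cons, ih, pv_items_inner, List.filter_filter]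
    apply List.filter_congr
    intro p _
    have hrange : ((PySem.List.pyRange 0 (PySem.Str.len q.2) 1).any (fun i => p.1 == q.1 + i))
        = decide (q.1 ≤ p.1 ∧ p.1 < q.1 + PySem.Str.len q.2) := by
      rw [Bool.eq_iff_iff]
      simp only [List.any_eq_true, PySem.List.mem_pyRange_one, beq_iff_eq, decide_eq_true_eq]
      constructor
      · rintro ⟨i, ⟨h0, h1⟩, heq⟩; omega
      · rintro ⟨h0, h1⟩; exact ⟨p.1 - q.1, ⟨by omega, by omega⟩, by omega⟩
    rw [hrange]
    simp only [pvHit, List.any_cons]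
    cases h1 : decide (q.1 ≤ p.1 ∧ p.1 < q.1 + PySem.Str.len q.2) <;>
      cases h2 : t.any (fun r => decide (r.1 ≤ p.1 ∧ p.1 < r.1 + PySem.Str.len r.2)) <;>
        simp [h1, h2, pvHit]

-- running max as List.max?
theorem pv_foldl_upd_some (l : List Int) (v : Int) :
    l.foldl pvUpd (some v) = some (l.foldl max v) := by
  induction l generalizing v with
  | nil => rfl
  | cons x t ih =>
    have : pvUpd (some v) x = some (max v x) := by
      simp only [pvUpd]
      split_ifs with h
      · rw [max_eq_right (le_of_lt h)]
      · rw [max_eq_left (not_lt.mp h)]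
    simp [this, ih]

theorem pv_optmax_eq_max? (l : List Int) :
    l.foldl pvUpd none = l.max? := by
  cases l with
  | nil => rfl
  | cons x t => simp [pvUpd, pv_foldl_upd_some, List.max?]

-- while-loop spec: it advances the pointer over exactly the starts ≤ idx and folds their ends
theorem pvWhileB_spec (ivals : List (Int × Int)) (idx : Int) :
    ∀ fuel j (m : Option Int), ivals.length - j ≤ fuel → j ≤ ivals.length →
      j ≤ (pvWhileB ivals idx j m).1 ∧
      (pvWhileB ivals idx j m).1 ≤ ivals.length ∧
      (∀ i (h : i < ivals.length), j ≤ i → i < (pvWhileB ivals idx j m).1 → (ivals[i]).1 ≤ idx) ∧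
      (∀ (h : (pvWhileB ivals idx j m).1 < ivals.length), idx < (ivals[(pvWhileB ivals idx j m).1]'h).1) ∧
      (m = ((ivals.take j).map Prod.snd).foldl pvUpd none →
        (pvWhileB ivals idx j m).2 = ((ivals.take (pvWhileB ivals idx j m).1).map Prod.snd).foldl pvUpd none) := by
  intro fuel
  induction fuel with
  | zero =>
    intro j m hf hj
    have hs : pvWhileB ivals idx j m = (j, m) := by
      rw [pvWhileB, dif_neg (by omega : ¬ j < ivals.length)]
    rw [hs]
    refine ⟨le_refl _, hj, ?_, ?_, fun hm => hm⟩
    · intro i h h1 h2; omega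
    · intro h; omega
  | succ n ih =>
    intro j m hf hj
    rw [pvWhileB]
    by_cases h : j < ivals.length
    · rw [dif_pos h]
      by_cases hle : (ivals[j]).1 ≤ idx
      · rw [if_pos hle]
        have hrec := ih (j + 1) (pvUpd m (ivals[j]).2) (by omega) (by omega)
        obtain ⟨r1, r2, r3, r4, r5⟩ := hrec
        refine ⟨by omega, r2, ?_, r4, ?_⟩
        · intro i hi h1 h2
          by_cases hij : i = j
          · subst hij; exact hle
          · exact r3 i hi (by omega) h2
        · intro hm
          apply r5
          have htake : ivals.take (j + 1) = ivals.take j ++ [ivals[j]] := by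
            rw [List.take_succ, List.getElem?_eq_getElem h]
            rfl
          rw [hm, htake, List.map_append, List.foldl_append]
          rfl
      · rw [if_neg hle]
        refine ⟨le_refl _, by omega, ?_, ?_, fun hm => hm⟩
        · intro i hi h1 h2; omega
        · intro hh
          exact lt_of_not_ge hle
    · rw [dif_neg h]
      refine ⟨le_refl _, by omega, ?_, ?_, fun hm => hm⟩
      · intro i hi h1 h2; omega
      · intro hh; omega

-- the survival test equals non-coverage
theorem pv_test (ivals : List (Int × Int)) (hiv : ivals.Pairwise (fun a b => a.1 ≤ b.1))
    (k : Int) (j' : Nat) (hj' : j' ≤ ivals.length)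
    (hcons : ∀ i (h : i < ivals.length), i < j' → (ivals[i]).1 ≤ k)
    (hstop : ∀ (h : j' < ivals.length), k < (ivals[j']'h).1) :
    (match ((ivals.take j').map Prod.snd).foldl pvUpd none with
      | none => true
      | some v => decide (v ≤ k))
      = !ivals.any (fun q => decide (q.1 ≤ k ∧ k < q.2)) := by
  have hkgt : ∀ i (h : i < ivals.length), j' ≤ i → k < (ivals[i]).1 := by
    intro i h hji
    have h1 := hstop (by omega)
    rcases eq_or_lt_of_le hji with heq | hlt
    · subst heq; exact h1
    · exact lt_of_lt_of_le h1 (List.pairwise_iff_getElem.mp hiv j' i (by omega) h hlt)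
  have hcov : (ivals.any (fun q => decide (q.1 ≤ k ∧ k < q.2)) = true)
      ↔ ∃ i, ∃ (h : i < ivals.length), i < j' ∧ k < (ivals[i]).2 := by
    simp only [List.any_eq_true, decide_eq_true_eq]
    constructor
    · rintro ⟨q, hq, h1, h2⟩
      obtain ⟨i, h, heq⟩ := List.mem_iff_getElem.mp hq
      subst heq
      have hij : i < j' := by
        by_contra hge
        exact absurd h1 (not_le.mpr (hkgt i h (by omega)))
      exact ⟨i, h, hij, h2⟩
    · rintro ⟨i, h, hij, hk2⟩
      exact ⟨ivals[i], List.mem_iff_getElem.mpr ⟨i, h, rfl⟩, hcons i h hij, hk2⟩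
  have hmem_l : ∀ x, x ∈ (ivals.take j').map Prod.snd
      ↔ ∃ i, ∃ (h : i < ivals.length), i < j' ∧ x = (ivals[i]).2 := by
    intro x
    simp only [List.mem_map, List.mem_take_iff_getElem]
    constructor
    · rintro ⟨q, ⟨i, hi, heq⟩, rfl⟩
      exact ⟨i, by omega, by omega, by rw [← heq]⟩
    · rintro ⟨i, h, hij, rfl⟩
      exact ⟨ivals[i], ⟨i, by omega, rfl⟩, rfl⟩
  rw [pv_optmax_eq_max?]
  cases hM : ((ivals.take j').map Prod.snd).max? with
  | none =>
    have hnil : (ivals.take j').map Prod.snd = [] := List.max?_eq_none_iff.mp hM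
    simp only []
    symm
    rw [Bool.not_eq_eq_eq_not, Bool.not_true]
    rw [Bool.eq_false_iff]
    intro hany
    obtain ⟨i, h, hij, _⟩ := hcov.mp hany
    have : (ivals[i]).2 ∈ (ivals.take j').map Prod.snd := (hmem_l _).mpr ⟨i, h, hij, rfl⟩
    rw [hnil] at this
    exact absurd this (List.not_mem_nil)
  | some v =>
    obtain ⟨hvmem, hvmax⟩ := (List.max?_eq_some_iff.mp hM)
    by_cases hany : ivals.any (fun q => decide (q.1 ≤ k ∧ k < q.2)) = true
    · obtain ⟨i, h, hij, hk2⟩ := hcov.mp hany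
      have hle : (ivals[i]).2 ≤ v := hvmax _ ((hmem_l _).mpr ⟨i, h, hij, rfl⟩)
      have hnk : ¬ v ≤ k := by omega
      have hred : (match (some v : Option Int) with | none => true | some v => decide (v ≤ k))
          = decide (v ≤ k) := rfl
      rw [hred, hany, decide_eq_false hnk]
      rfl
    · have hvk : v ≤ k := by
        by_contra hvk
        obtain ⟨i, h, hij, rfl⟩ := (hmem_l v).mp hvmem
        exact hany (hcov.mpr ⟨i, h, hij, by omega⟩)
      have hf : ivals.any (fun q => decide (q.1 ≤ k ∧ k < q.2)) = false :=
        eq_false_of_ne_true hany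
      have hred : (match (some v : Option Int) with | none => true | some v => decide (v ≤ k))
          = decide (v ≤ k) := rfl
      rw [hred, hf, decide_eq_true hvk]
      rfl

-- the sweep loop filters out exactly the covered keys
theorem pv_sweep (ivals : List (Int × Int)) (hiv : ivals.Pairwise (fun a b => a.1 ≤ b.1)) :
    ∀ (es : List (Int × String)) (j : Nat) (m : Option Int) (acc : List (Int × String)),
      j ≤ ivals.length →
      (∀ p ∈ es, ∀ i (h : i < ivals.length), i < j → (ivals[i]).1 ≤ p.1) →
      es.Pairwise (fun a b => a.1 ≤ b.1) →
      m = ((ivals.take j).map Prod.snd).foldl pvUpd none →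
      (es.foldl (pvStep ivals) (j, m, acc)).2.2
      = acc ++ es.filter (fun p => !ivals.any (fun q => decide (q.1 ≤ p.1 ∧ p.1 < q.2))) := by
  intro es
  induction es with
  | nil => intro j m acc _ _ _ _; simp
  | cons p t ih =>
    intro j m acc hj hfut hes hm
    obtain ⟨r1, r2, r3, r4, r5⟩ :=
      pvWhileB_spec ivals p.1 (ivals.length - j) j m (le_refl _) hj
    have hm' : (pvWhileB ivals p.1 j m).2
        = ((ivals.take (pvWhileB ivals p.1 j m).1).map Prod.snd).foldl pvUpd none := r5 hm
    have hconsall : ∀ i (h : i < ivals.length), i < (pvWhileB ivals p.1 j m).1 → (ivals[i]).1 ≤ p.1 := by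
      intro i h hi
      by_cases hij : i < j
      · exact hfut p (List.mem_cons_self) i h hij
      · exact r3 i h (by omega) hi
    have htest := pv_test ivals hiv p.1 (pvWhileB ivals p.1 j m).1 r2 hconsall r4
    have hstep : pvStep ivals (j, m, acc) p
        = ((pvWhileB ivals p.1 j m).1, (pvWhileB ivals p.1 j m).2,
            if !ivals.any (fun q => decide (q.1 ≤ p.1 ∧ p.1 < q.2)) then acc ++ [p] else acc) := by
      simp only [pvStep]
      rw [hm', htest]
      cases hb : (!ivals.any (fun q => decide (q.1 ≤ p.1 ∧ p.1 < q.2))) <;> simp [hb]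
    have hfut' : ∀ p' ∈ t, ∀ i (h : i < ivals.length), i < (pvWhileB ivals p.1 j m).1 → (ivals[i]).1 ≤ p'.1 := by
      intro p' hp' i h hi
      exact le_trans (hconsall i h hi) ((List.pairwise_cons.mp hes).1 p' hp')
    have hrec := ih (pvWhileB ivals p.1 j m).1 (pvWhileB ivals p.1 j m).2
      (if !ivals.any (fun q => decide (q.1 ≤ p.1 ∧ p.1 < q.2)) then acc ++ [p] else acc)
      r2 hfut' (List.pairwise_cons.mp hes).2 hm'
    rw [List.foldl_cons, hstep, hrec, List.filter_cons]
    by_cases hc : (!ivals.any (fun q => decide (q.1 ≤ p.1 ∧ p.1 < q.2))) = true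
    · rw [if_pos hc, if_pos hc, List.append_assoc, List.singleton_append]
    · rw [if_neg hc, if_neg hc]

-- lexicographic ≤ implies ≤ on first components
theorem pv_lex_le_fst {β : Type} [LinearOrder β] (a b : Int × β)
    (h : toLex (a.1, a.2) ≤ toLex (b.1, b.2)) : a.1 ≤ b.1 := by
  rcases Prod.Lex.toLex_le_toLex.mp h with h1 | ⟨h1, _⟩
  · exact le_of_lt h1
  · exact le_of_eq h1

-- ===== VERDICT (by name: the statement is the Claim_ definition above) =====
theorem apply_remove_spec : Claim_equal_apply_remove := by
  intro deltas removed _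
  unfold Spec_apply_remove apply_remove apply_remove_alt
  simp only []
  rw [pv_sorted2_eq_lex, pv_sorted2_eq_lex, pv_sorted2_eq_lex, pv_items_A]
  set d0i := (PySem.Dict.ofList deltas).items with hd0i
  set f := (fun q : Int × String => (q.1, q.1 + PySem.Str.len q.2)) with hf
  set key := (fun p : Int × String => toLex (p.1, p.2)) with hkey
  set key2 := (fun p : Int × Int => toLex (p.1, p.2)) with hkey2
  set events := PySem.List.sorted d0i key with hevents
  set ivals := PySem.List.sorted (removed.map f) key2 with hivals
  have hivfst : ivals.Pairwise (fun a b => a.1 ≤ b.1) :=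
    (PySem.List.sorted_pairwise (removed.map f) key2).imp (fun h => pv_lex_le_fst _ _ h)
  have hevle : events.Pairwise (fun a b => key a ≤ key b) :=
    PySem.List.sorted_pairwise d0i key
  have hperm : events.Perm d0i := PySem.List.sorted_perm d0i key false
  have hnodup : (events.map Prod.fst).Nodup := by
    have hkeq : (PySem.Dict.ofList deltas).keys = d0i.map Prod.fst := by
      rw [hd0i]
      rfl
    have h1 : (d0i.map Prod.fst).Nodup := by
      rw [← hkeq]; exact PySem.Dict.nodup_keys_ofList deltas
    exact ((hperm.map Prod.fst).nodup_iff).mpr h1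
  have hevlt : events.Pairwise (fun a b => key a < key b) := by
    have hne : events.Pairwise (fun a b => a.1 ≠ b.1) := List.pairwise_map.mp hnodup
    exact (hevle.and hne).imp (fun h =>
      lt_of_le_of_ne h.1 (fun heq => h.2 (congrArg (fun x => (ofLex x).1) heq)))
  have hAfilter : PySem.List.sorted (d0i.filter (fun p => !pvHit removed p.1)) key
      = events.filter (fun p => !pvHit removed p.1) :=
    PySem.List.sorted_eq_of_perm_of_pairwise_lt _ _ key (hperm.filter _) (hevlt.filter _)
  have hevfstle : events.Pairwise (fun a b => a.1 ≤ b.1) :=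
    hevle.imp (fun h => pv_lex_le_fst _ _ h)
  have hB := pv_sweep ivals hivfst events 0 none [] (Nat.zero_le _)
    (fun p _ i h hi => absurd hi (Nat.not_lt_zero i)) hevfstle rfl
  rw [hAfilter, hB, List.nil_append]
  apply List.filter_congr
  intro p _
  have hpermiv : ivals.Perm (removed.map f) := PySem.List.sorted_perm (removed.map f) key2 false
  have hany : ivals.any (fun q => decide (q.1 ≤ p.1 ∧ p.1 < q.2))
      = pvHit removed p.1 := by
    have h1 : ivals.any (fun q => decide (q.1 ≤ p.1 ∧ p.1 < q.2))
        = (removed.map f).any (fun q => decide (q.1 ≤ p.1 ∧ p.1 < q.2)) := by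
      rw [Bool.eq_iff_iff]
      simp only [List.any_eq_true]
      constructor
      · rintro ⟨q, hq, hh⟩; exact ⟨q, hpermiv.mem_iff.mp hq, hh⟩
      · rintro ⟨q, hq, hh⟩; exact ⟨q, hpermiv.mem_iff.mpr hq, hh⟩
    rw [h1, List.any_map]
    rfl
  rw [hany]
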